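-- pv_equiv track=rewrite | github.com/MrBrantCode/unitest_baseline | mut_generate/mist_train_cf/cf_80947/solution.py | digit_diff
-- ===== SOURCE A (Python) =====
-- def digit_diff(n, r):
--     sum_of_squares_n = sum(int(i) ** 2 for i in str(n))
--     sum_of_squares_r = sum(int(i) ** 2 for i in str(r))
--
--     sum_of_digits_n = sum(int(i) for i in str(n))
--     sum_of_digits_r = sum(int(i) for i in str(r))
--
--     square_of_sum_n = sum_of_digits_n ** 2
--     square_of_sum_r = sum_of_digits_r ** 2
--
--     result_n = square_of_sum_n - sum_of_squares_n
--     result_r = square_of_sum_r - sum_of_squares_r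
--
--     return abs(result_n - result_r)
-- ===== SOURCE B (Python) =====
-- def _f(x):
--     # 2 * sum of pairwise products of the digits of x
--     # == (sum of digits)^2 - (sum of squared digits)
--     ds = [int(c) for c in str(x)]
--     total = 0
--     while ds:
--         d = ds.pop(0)
--         total += sum(d * e for e in ds)
--     return 2 * total
--
--
-- def digit_diff(n, r):
--     return abs(_f(n) - _f(r))
-- ===== Notes on version B (the rewrite author's own statement) =====
-- stated objective: alternative
-- what changed: Replaces A's four separate digit passes and the squared-sum-minus-sum-of-squares arithmetic with one pairwise pass per number using the identity (sum d)^2 - sum d^2 = 2*sum_{i<j} d_i*d_j.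
import Mathlib
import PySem

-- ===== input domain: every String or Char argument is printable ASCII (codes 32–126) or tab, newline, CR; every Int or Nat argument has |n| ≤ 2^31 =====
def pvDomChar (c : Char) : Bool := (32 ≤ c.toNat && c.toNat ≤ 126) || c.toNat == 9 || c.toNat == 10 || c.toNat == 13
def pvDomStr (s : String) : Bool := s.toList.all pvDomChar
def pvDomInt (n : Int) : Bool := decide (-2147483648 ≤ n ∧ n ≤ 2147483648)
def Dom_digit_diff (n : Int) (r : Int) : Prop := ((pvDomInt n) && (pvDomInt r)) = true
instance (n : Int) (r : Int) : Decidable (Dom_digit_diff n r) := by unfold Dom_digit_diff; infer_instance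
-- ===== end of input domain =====

-- B replaces A's separate digit-sum / sum-of-squares passes by one pairwise-product pass
-- per number (identity (Σd)² − Σd² = 2·Σ_{i<j} dᵢdⱼ); objective: alternative decomposition.

-- ===== PORT A =====
-- int(c) for a single character c; getD 0 is unreachable under Pre_ (every char of
-- str(n) for n ≥ 0 is a decimal digit, where ofChars? is exact).
def pvDig (c : Char) : Int := (PySem.Int.ofChars? [c]).getD 0

def digit_diff (n : Int) (r : Int) : Int :=
  let sum_of_squares_n := ((PySem.Int.toChars n).map (fun c => pvDig c ^ 2)).sum
  let sum_of_squares_r := ((PySem.Int.toChars r).map (fun c => pvDig c ^ 2)).sum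
  let sum_of_digits_n := ((PySem.Int.toChars n).map pvDig).sum
  let sum_of_digits_r := ((PySem.Int.toChars r).map pvDig).sum
  let square_of_sum_n := sum_of_digits_n ^ 2
  let square_of_sum_r := sum_of_digits_r ^ 2
  let result_n := square_of_sum_n - sum_of_squares_n
  let result_r := square_of_sum_r - sum_of_squares_r
  |result_n - result_r|

-- ===== PORT B =====
-- the 'while ds: d = ds.pop(0); total += sum(d*e for e in ds)' loop, structurally
def pvPairSum : List Int → Int
  | [] => 0
  | d :: t => (t.map (fun e => d * e)).sum + pvPairSum t

def pvF (x : Int) : Int :=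
  let ds := (PySem.Int.toChars x).map pvDig
  2 * pvPairSum ds

def digit_diff_alt (n : Int) (r : Int) : Int :=
  |pvF n - pvF r|

-- ===== PRECONDITION & SPEC =====
-- A raises ValueError when str(n) or str(r) contains '-', i.e. on negative arguments.
def Pre_digit_diff (n : Int) (r : Int) : Prop := 0 ≤ n ∧ 0 ≤ r
instance (n : Int) (r : Int) : Decidable (Pre_digit_diff n r) := by unfold Pre_digit_diff; infer_instance
def pvWitness_digit_diff : Int × Int := (123, 45)

def Spec_digit_diff (n : Int) (r : Int) (out : Int) : Prop := out = digit_diff_alt n r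
instance (n : Int) (r : Int) (out : Int) : Decidable (Spec_digit_diff n r out) := by unfold Spec_digit_diff; infer_instance

-- ===== CLAIM (what is proved, stated in full; the proofs are below) =====
def Claim_equal_digit_diff : Prop := ∀ (n : Int) (r : Int), Dom_digit_diff n r → Pre_digit_diff n r → Spec_digit_diff n r (digit_diff n r)

-- ===== LEMMAS AND PROOFS =====

theorem sum_map_mul (d : Int) (t : List Int) :
    (t.map (fun e => d * e)).sum = d * t.sum := by
  induction t with
  | nil => simp
  | cons a s ihs => simp [ihs, mul_add]

theorem two_pvPairSum (l : List Int) :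
    2 * pvPairSum l = l.sum ^ 2 - (l.map (fun d => d ^ 2)).sum := by
  induction l with
  | nil => simp [pvPairSum]
  | cons d t ih =>
    simp only [pvPairSum, List.map_cons, List.sum_cons, mul_add]
    rw [sum_map_mul, ih]
    ring

theorem digit_diff_eq_alt (n r : Int) : digit_diff n r = digit_diff_alt n r := by
  unfold digit_diff digit_diff_alt pvF
  simp only [two_pvPairSum, List.map_map, Function.comp_def]

-- ===== VERDICT (by name: the statement is the Claim_ definition above) =====
theorem digit_diff_spec : Claim_equal_digit_diff := by
  intro n r _ _
  unfold Spec_digit_diff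
  exact digit_diff_eq_alt n r
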